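-- pv_equiv track=rewrite | github.com/SantiagoDeniz/buscador-inmobiliario | core/scraper/utils.py | stemming_basico
-- ===== SOURCE A (Python) =====
-- def stemming_basico(palabra: str) -> str:
--     try:
--         palabra = str(palabra)
--     except Exception:
--         return ""
--     sufijos = ['oso', 'osa', 'idad', 'cion', 'sion', 'ero', 'era', 'ado', 'ada']
--     for sufijo in sufijos:
--         # Permite recortar si la base resultante tiene al menos 3 caracteres
--         if palabra.endswith(sufijo) and len(palabra) >= len(sufijo) + 3:
--             return palabra[:-len(sufijo)]
--     return palabra
-- ===== SOURCE B (Python) =====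
-- # B: a right-to-left DFA over the word's tail (explicit transition/accept tables
-- # built from the reversed suffixes) instead of A's loop of endswith tests.
-- _DELTA = {
--     (0, 'o'): 1, (1, 's'): 2, (2, 'o'): 3,
--     (0, 'a'): 4, (4, 's'): 5, (5, 'o'): 6,
--     (0, 'd'): 7, (7, 'a'): 8, (8, 'd'): 9, (9, 'i'): 10,
--     (0, 'n'): 11, (11, 'o'): 12, (12, 'i'): 13, (13, 'c'): 14, (13, 's'): 15,
--     (1, 'r'): 16, (16, 'e'): 17,
--     (4, 'r'): 18, (18, 'e'): 19,
--     (1, 'd'): 20, (20, 'a'): 21,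
--     (4, 'd'): 22, (22, 'a'): 23,
-- }
-- _CUT = {3: 3, 6: 3, 10: 4, 14: 4, 15: 4, 17: 3, 19: 3, 21: 3, 23: 3}
--
--
-- def stemming_basico(palabra: str) -> str:
--     palabra = str(palabra)
--     state = 0
--     for i in range(len(palabra) - 1, -1, -1):
--         state = _DELTA.get((state, palabra[i]))
--         if state is None:
--             return palabra
--         cut = _CUT.get(state)
--         if cut is not None:
--             if len(palabra) >= cut + 3:
--                 return palabra[:-cut]
--             return palabra
--     return palabra
-- ===== Notes on version B (the rewrite author's own statement) =====
-- stated objective: alternative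
-- what changed: Replaced A's loop of endswith tests against a suffix list by a single right-to-left scan of the word through an explicit DFA (transition/accept tables built from the reversed suffixes), so no suffix string is ever compared as a whole.
import Mathlib
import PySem

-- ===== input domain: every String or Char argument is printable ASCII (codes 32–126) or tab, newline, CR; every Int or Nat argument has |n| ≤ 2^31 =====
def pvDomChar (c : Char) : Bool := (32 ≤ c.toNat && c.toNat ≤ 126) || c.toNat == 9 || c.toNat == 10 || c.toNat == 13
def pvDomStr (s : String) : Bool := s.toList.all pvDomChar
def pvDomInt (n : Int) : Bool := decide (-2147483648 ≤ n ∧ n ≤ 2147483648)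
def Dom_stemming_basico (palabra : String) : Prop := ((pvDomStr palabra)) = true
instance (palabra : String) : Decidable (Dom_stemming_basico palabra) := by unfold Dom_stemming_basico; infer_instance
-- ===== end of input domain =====

-- B replaces A's loop of endswith tests by a single right-to-left DFA scan of the
-- word (explicit transition/accept tables over the reversed suffixes); objective:
-- alternative. A's `try: str(palabra)` never raises on a str argument, so both
-- ports take the normal path.

-- ===== PORT A =====
-- the for-loop over `sufijos`, first match returns palabra[:-len(sufijo)]
def stemLoop (palabra : String) : List String → String
  | [] => palabra
  | sufijo :: rest =>
    if PySem.Str.endswith palabra sufijo = true ∧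
        PySem.Str.len palabra ≥ PySem.Str.len sufijo + 3 then
      PySem.Str.slice palabra none (some (-(PySem.Str.len sufijo : Int)))
    else stemLoop palabra rest

def stemming_basico (palabra : String) : String :=
  stemLoop palabra ["oso", "osa", "idad", "cion", "sion", "ero", "era", "ado", "ada"]

-- ===== PORT B =====
-- Source B's module constants _DELTA and _CUT (dict → association list / PySem.Dict)
def pvDeltaTable : PySem.Dict (Int × Char) Int := PySem.Dict.mk
  [((0, 'o'), 1), ((1, 's'), 2), ((2, 'o'), 3),
   ((0, 'a'), 4), ((4, 's'), 5), ((5, 'o'), 6),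
   ((0, 'd'), 7), ((7, 'a'), 8), ((8, 'd'), 9), ((9, 'i'), 10),
   ((0, 'n'), 11), ((11, 'o'), 12), ((12, 'i'), 13), ((13, 'c'), 14), ((13, 's'), 15),
   ((1, 'r'), 16), ((16, 'e'), 17),
   ((4, 'r'), 18), ((18, 'e'), 19),
   ((1, 'd'), 20), ((20, 'a'), 21),
   ((4, 'd'), 22), ((22, 'a'), 23)]

def pvCutTable : PySem.Dict Int Int := PySem.Dict.mk
  [(3, 3), (6, 3), (10, 4), (14, 4), (15, 4), (17, 3), (19, 3), (21, 3), (23, 3)]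

-- Source B's backward index loop `for i in range(len(palabra)-1, -1, -1)` reading
-- palabra[i], ported as structural recursion over the reversed character list
def altLoop (palabra : String) : Int → List Char → String
  | _, [] => palabra
  | state, c :: rest =>
    match PySem.Dict.get? pvDeltaTable (state, c) with
    | none => palabra
    | some state' =>
      match PySem.Dict.get? pvCutTable state' with
      | some cut =>
        if PySem.Str.len palabra ≥ cut + 3 then
          PySem.Str.slice palabra none (some (-cut))
        else palabra
      | none => altLoop palabra state' rest

def stemming_basico_alt (palabra : String) : String :=
  altLoop palabra 0 palabra.toList.reverse

-- ===== PRECONDITION & SPEC =====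
def Spec_stemming_basico (palabra : String) (out : String) : Prop := out = stemming_basico_alt palabra
instance (palabra : String) (out : String) : Decidable (Spec_stemming_basico palabra out) := by unfold Spec_stemming_basico; infer_instance

-- ===== CLAIM (what is proved, stated in full; the proofs are below) =====
def Claim_equal_stemming_basico : Prop := ∀ (palabra : String), Dom_stemming_basico palabra → Spec_stemming_basico palabra (stemming_basico palabra)

-- ===== LEMMAS AND PROOFS =====

-- endswith as a prefix test on the reversed character list
theorem endswith_rev (p s : String) (l : List Char) (h : s.toList.reverse = l) :
    (PySem.Str.endswith p s = true) = (l <+: p.toList.reverse) := by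
  subst h
  rw [PySem.Str.endswith_eq, List.reverse_prefix]
  exact propext (PySem.Chars.endswith_iff _ _)

-- ===== VERDICT (by name: the statement is the Claim_ definition above) =====
theorem stemming_basico_spec : Claim_equal_stemming_basico := by
  intro p _
  unfold Spec_stemming_basico stemming_basico stemming_basico_alt
  simp only [stemLoop,
    endswith_rev p "oso" ['o','s','o'] (by decide),
    endswith_rev p "osa" ['a','s','o'] (by decide),
    endswith_rev p "idad" ['d','a','d','i'] (by decide),
    endswith_rev p "cion" ['n','o','i','c'] (by decide),
    endswith_rev p "sion" ['n','o','i','s'] (by decide),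
    endswith_rev p "ero" ['o','r','e'] (by decide),
    endswith_rev p "era" ['a','r','e'] (by decide),
    endswith_rev p "ado" ['o','d','a'] (by decide),
    endswith_rev p "ada" ['a','d','a'] (by decide),
    show PySem.Str.len "oso" = 3 from by decide, show PySem.Str.len "osa" = 3 from by decide,
    show PySem.Str.len "idad" = 4 from by decide, show PySem.Str.len "cion" = 4 from by decide,
    show PySem.Str.len "sion" = 4 from by decide, show PySem.Str.len "ero" = 3 from by decide,
    show PySem.Str.len "era" = 3 from by decide, show PySem.Str.len "ado" = 3 from by decide,
    show PySem.Str.len "ada" = 3 from by decide]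
  generalize p.toList.reverse = r
  rcases r with _ | ⟨c1, r1⟩
  · simp [altLoop]
  · by_cases h1 : c1 = 'o'
    · subst h1
      rcases r1 with _ | ⟨c2, r2⟩
      · simp [altLoop, pvDeltaTable, pvCutTable, PySem.Dict.get?]
      · by_cases h2 : c2 = 's'
        · subst h2
          rcases r2 with _ | ⟨c3, r3⟩
          · simp [altLoop, pvDeltaTable, pvCutTable, PySem.Dict.get?]
          · by_cases h3 : c3 = 'o'
            · subst h3
              simp [altLoop, pvDeltaTable, pvCutTable, PySem.Dict.get?,
                List.cons_prefix_cons]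
            · simp [altLoop, pvDeltaTable, pvCutTable, PySem.Dict.get?,
                List.cons_prefix_cons, Ne.symm h3]
        · by_cases h2r : c2 = 'r'
          · subst h2r
            rcases r2 with _ | ⟨c3, r3⟩
            · simp [altLoop, pvDeltaTable, pvCutTable, PySem.Dict.get?]
            · by_cases h3 : c3 = 'e'
              · subst h3
                simp [altLoop, pvDeltaTable, pvCutTable, PySem.Dict.get?,
                  List.cons_prefix_cons]
              · simp [altLoop, pvDeltaTable, pvCutTable, PySem.Dict.get?,
                  List.cons_prefix_cons, Ne.symm h3]
          · by_cases h2d : c2 = 'd'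
            · subst h2d
              rcases r2 with _ | ⟨c3, r3⟩
              · simp [altLoop, pvDeltaTable, pvCutTable, PySem.Dict.get?]
              · by_cases h3 : c3 = 'a'
                · subst h3
                  simp [altLoop, pvDeltaTable, pvCutTable, PySem.Dict.get?,
                    List.cons_prefix_cons]
                · simp [altLoop, pvDeltaTable, pvCutTable, PySem.Dict.get?,
                    List.cons_prefix_cons, Ne.symm h3]
            · simp [altLoop, pvDeltaTable, pvCutTable, PySem.Dict.get?,
                List.cons_prefix_cons, Ne.symm h2, Ne.symm h2r, Ne.symm h2d]
    · by_cases h1a : c1 = 'a'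
      · subst h1a
        rcases r1 with _ | ⟨c2, r2⟩
        · simp [altLoop, pvDeltaTable, pvCutTable, PySem.Dict.get?]
        · by_cases h2 : c2 = 's'
          · subst h2
            rcases r2 with _ | ⟨c3, r3⟩
            · simp [altLoop, pvDeltaTable, pvCutTable, PySem.Dict.get?]
            · by_cases h3 : c3 = 'o'
              · subst h3
                simp [altLoop, pvDeltaTable, pvCutTable, PySem.Dict.get?,
                  List.cons_prefix_cons]
              · simp [altLoop, pvDeltaTable, pvCutTable, PySem.Dict.get?,
                  List.cons_prefix_cons, Ne.symm h3]
          · by_cases h2r : c2 = 'r'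
            · subst h2r
              rcases r2 with _ | ⟨c3, r3⟩
              · simp [altLoop, pvDeltaTable, pvCutTable, PySem.Dict.get?]
              · by_cases h3 : c3 = 'e'
                · subst h3
                  simp [altLoop, pvDeltaTable, pvCutTable, PySem.Dict.get?,
                    List.cons_prefix_cons]
                · simp [altLoop, pvDeltaTable, pvCutTable, PySem.Dict.get?,
                    List.cons_prefix_cons, Ne.symm h3]
            · by_cases h2d : c2 = 'd'
              · subst h2d
                rcases r2 with _ | ⟨c3, r3⟩
                · simp [altLoop, pvDeltaTable, pvCutTable, PySem.Dict.get?]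
                · by_cases h3 : c3 = 'a'
                  · subst h3
                    simp [altLoop, pvDeltaTable, pvCutTable, PySem.Dict.get?,
                      List.cons_prefix_cons]
                  · simp [altLoop, pvDeltaTable, pvCutTable, PySem.Dict.get?,
                      List.cons_prefix_cons, Ne.symm h3]
              · simp [altLoop, pvDeltaTable, pvCutTable, PySem.Dict.get?,
                  List.cons_prefix_cons, Ne.symm h2, Ne.symm h2r, Ne.symm h2d]
      · by_cases h1d : c1 = 'd'
        · subst h1d
          rcases r1 with _ | ⟨c2, r2⟩
          · simp [altLoop, pvDeltaTable, pvCutTable, PySem.Dict.get?]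
          · by_cases h2 : c2 = 'a'
            · subst h2
              rcases r2 with _ | ⟨c3, r3⟩
              · simp [altLoop, pvDeltaTable, pvCutTable, PySem.Dict.get?]
              · by_cases h3 : c3 = 'd'
                · subst h3
                  rcases r3 with _ | ⟨c4, r4⟩
                  · simp [altLoop, pvDeltaTable, pvCutTable, PySem.Dict.get?]
                  · by_cases h4 : c4 = 'i'
                    · subst h4
                      simp [altLoop, pvDeltaTable, pvCutTable, PySem.Dict.get?,
                        List.cons_prefix_cons]
                    · simp [altLoop, pvDeltaTable, pvCutTable, PySem.Dict.get?,
                        List.cons_prefix_cons, Ne.symm h4]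
                · simp [altLoop, pvDeltaTable, pvCutTable, PySem.Dict.get?,
                    List.cons_prefix_cons, Ne.symm h3]
            · simp [altLoop, pvDeltaTable, pvCutTable, PySem.Dict.get?,
                List.cons_prefix_cons, Ne.symm h2]
        · by_cases h1n : c1 = 'n'
          · subst h1n
            rcases r1 with _ | ⟨c2, r2⟩
            · simp [altLoop, pvDeltaTable, pvCutTable, PySem.Dict.get?]
            · by_cases h2 : c2 = 'o'
              · subst h2
                rcases r2 with _ | ⟨c3, r3⟩
                · simp [altLoop, pvDeltaTable, pvCutTable, PySem.Dict.get?]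
                · by_cases h3 : c3 = 'i'
                  · subst h3
                    rcases r3 with _ | ⟨c4, r4⟩
                    · simp [altLoop, pvDeltaTable, pvCutTable, PySem.Dict.get?]
                    · by_cases h4 : c4 = 'c'
                      · subst h4
                        simp [altLoop, pvDeltaTable, pvCutTable, PySem.Dict.get?,
                          List.cons_prefix_cons]
                      · by_cases h4s : c4 = 's'
                        · subst h4s
                          simp [altLoop, pvDeltaTable, pvCutTable, PySem.Dict.get?,
                            List.cons_prefix_cons]
                        · simp [altLoop, pvDeltaTable, pvCutTable, PySem.Dict.get?,
                            List.cons_prefix_cons, Ne.symm h4, Ne.symm h4s]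
                  · simp [altLoop, pvDeltaTable, pvCutTable, PySem.Dict.get?,
                      List.cons_prefix_cons, Ne.symm h3]
              · simp [altLoop, pvDeltaTable, pvCutTable, PySem.Dict.get?,
                  List.cons_prefix_cons, Ne.symm h2]
          · simp [altLoop, pvDeltaTable, PySem.Dict.get?,
              List.cons_prefix_cons,
              Ne.symm h1, Ne.symm h1a, Ne.symm h1d, Ne.symm h1n]
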